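-- pv_equiv track=rewrite | github.com/kkldream/Face-Recognition-OpenCV-Python | mediapipe/demo_eye_detection.py | list_reduce_directionality
-- ===== SOURCE A (Python) =====
-- def list_reduce_directionality(arr):
--     times = 0
--     up = 0
--     new_arr = [i for i in arr]
--     pop_arr = []
--     for i, _ in enumerate(arr[:-1]):
--         a, b = arr[i], arr[i + 1]
--         if b - a == 0:
--             pop_arr.append(i)
--             up == 0
--         elif b - a > 0:
--             if up != 1: times += 1
--             else: pop_arr.append(i)
--             up = 1
--         elif b - a < 0:
--             if up != -1: pass
--             else: pop_arr.append(i)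
--             up = -1
--     pop_arr.reverse()
--     for i in pop_arr:
--         new_arr.pop(i)
--     return new_arr
-- ===== SOURCE B (Python) =====
-- def list_reduce_directionality(arr):
--     up = 0
--     out = []
--     for a, b in zip(arr, arr[1:]):
--         s = (b > a) - (b < a)
--         if s != 0:
--             if s != up:
--                 out.append(a)
--             up = s
--     out.extend(arr[-1:])
--     return out
-- ===== Notes on version B (the rewrite author's own statement) =====
-- stated objective: faster
-- what changed: Builds the result directly in one forward pass over adjacent pairs (zip), keeping an element exactly when the move sign is nonzero and differs from the running direction, instead of copying the list, collecting pop indices, reversing them and popping one by one from the copy.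
import Mathlib
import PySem

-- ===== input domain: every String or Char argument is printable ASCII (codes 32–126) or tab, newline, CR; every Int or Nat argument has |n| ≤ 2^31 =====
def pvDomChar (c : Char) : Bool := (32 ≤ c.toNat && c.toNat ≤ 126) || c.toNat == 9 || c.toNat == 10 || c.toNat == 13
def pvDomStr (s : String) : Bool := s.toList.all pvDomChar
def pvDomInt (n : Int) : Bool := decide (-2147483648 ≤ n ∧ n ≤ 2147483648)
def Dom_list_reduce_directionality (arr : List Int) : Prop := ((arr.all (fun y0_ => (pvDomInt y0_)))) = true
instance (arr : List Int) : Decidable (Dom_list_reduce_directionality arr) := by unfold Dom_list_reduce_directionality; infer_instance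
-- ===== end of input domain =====

-- B replaces A's copy/pop-index/reverse/pop pipeline (quadratic: each pop is O(n)) by a single
-- O(n) forward pass over adjacent pairs that appends kept elements directly (objective: faster).

-- ===== PORT A =====
-- loop body of A: state (times, up, pop_arr); i is the loop index.
-- arr.getD i 0 is exact for arr[i] here: the loop only reads indices 0..len-1.
def pvStepA (arr : List Int) (st : Int × Int × List Nat) (i : Nat) : Int × Int × List Nat :=
  let times := st.1; let up := st.2.1; let pop := st.2.2
  let a := arr.getD i 0
  let b := arr.getD (i+1) 0
  if b - a = 0 then (times, up, pop ++ [i])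
  else if b - a > 0 then
    (if up ≠ 1 then (times + 1, 1, pop) else (times, 1, pop ++ [i]))
  else
    (if up ≠ -1 then (times, -1, pop) else (times, -1, pop ++ [i]))

def list_reduce_directionality (arr : List Int) : List Int :=
  let new_arr := arr   -- [i for i in arr]
  let st := (List.range (arr.length - 1)).foldl (pvStepA arr) (0, 0, [])
  let pop_rev := st.2.2.reverse
  -- new_arr.pop(i): every recorded index is < new_arr.length, so eraseIdx is exact
  pop_rev.foldl (fun l i => l.eraseIdx i) new_arr

-- ===== PORT B =====
-- loop body of B: state (up, out); p = (a, b) an adjacent pair.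
def pvStepB (st : Int × List Int) (p : Int × Int) : Int × List Int :=
  let s : Int := (if p.1 < p.2 then 1 else 0) - (if p.2 < p.1 then 1 else 0)
  if s ≠ 0 then (s, if s ≠ st.1 then st.2 ++ [p.1] else st.2) else st

def list_reduce_directionality_alt (arr : List Int) : List Int :=
  let r := (arr.zip (arr.drop 1)).foldl pvStepB (0, [])   -- zip(arr, arr[1:])
  r.2 ++ PySem.List.slice arr (some (-1)) none            -- out.extend(arr[-1:])

-- ===== PRECONDITION & SPEC =====
def Spec_list_reduce_directionality (arr : List Int) (out : List Int) : Prop := out = list_reduce_directionality_alt arr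
instance (arr : List Int) (out : List Int) : Decidable (Spec_list_reduce_directionality arr out) := by unfold Spec_list_reduce_directionality; infer_instance

-- ===== CLAIM (what is proved, stated in full; the proofs are below) =====
def Claim_equal_list_reduce_directionality : Prop := ∀ (arr : List Int), Dom_list_reduce_directionality arr → Spec_list_reduce_directionality arr (list_reduce_directionality arr)

-- ===== LEMMAS AND PROOFS =====

-- keepF k P xs: the elements of xs (whose positions in the original list are k, k+1, …)
-- whose position is not in P.
def keepF (k : Nat) (P : List Nat) : List Int → List Int
  | [] => []
  | a :: t => if k ∈ P then keepF (k+1) P t else a :: keepF (k+1) P t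

theorem keepF_irrel_low (t : List Int) : ∀ (k j : Nat) (P : List Nat), j < k →
    keepF k (j :: P) t = keepF k P t := by
  induction t with
  | nil => intro k j P h; rfl
  | cons a t ih =>
    intro k j P h
    simp only [keepF, List.mem_cons]
    have : ¬ k = j := by omega
    simp [this, ih (k+1) j P (by omega)]

theorem keepF_erase (t : List Int) : ∀ (k j : Nat) (P : List Nat),
    (∀ m ∈ P, j < m) → k ≤ j →
    (keepF k P t).eraseIdx (j - k) = keepF k (j :: P) t := by
  induction t with
  | nil => intro k j P _ _; rfl
  | cons a t ih =>
    intro k j P hP hkj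
    have hknP : k ∉ P := fun h => by have := hP k h; omega
    by_cases hkj' : k = j
    · subst hkj'
      simp [keepF, hknP, keepF_irrel_low t (k+1) k P (by omega)]
    · have hk : k < j := by omega
      have : ¬ k = j := hkj'
      simp only [keepF, hknP, List.mem_cons, this, false_or]
      have hjk : j - k = (j - (k+1)) + 1 := by omega
      simp [hjk, ih (k+1) j P hP (by omega)]

theorem keepF_all (ys : List Int) : ∀ (k : Nat) (P : List Nat),
    (∀ m ∈ P, m < k) → keepF k P ys = ys := by
  induction ys with
  | nil => intro k P _; rfl
  | cons a t ih =>
    intro k P h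
    have : k ∉ P := fun hm => by have := h k hm; omega
    simp [keepF, this, ih (k+1) P (fun m hm => by have := h m hm; omega)]

theorem eraseIdxs_keepF (P : List Nat) : ∀ (arr : List Int), P.Pairwise (· < ·) →
    P.reverse.foldl (fun l i => l.eraseIdx i) arr = keepF 0 P arr := by
  induction P with
  | nil =>
    intro arr _
    simp only [List.reverse_nil, List.foldl_nil]
    rw [keepF_all arr 0 [] (by simp)]
  | cons j P ih =>
    intro arr hp
    rw [List.pairwise_cons] at hp
    have := ih arr hp.2
    rw [List.reverse_cons, List.foldl_append, this]
    simpa using keepF_erase arr 0 j P hp.1 (by omega)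

theorem keepF_append (xs : List Int) : ∀ (ys : List Int) (k : Nat) (P : List Nat),
    keepF k P (xs ++ ys) = keepF k P xs ++ keepF (k + xs.length) P ys := by
  induction xs with
  | nil => intro ys k P; simp [keepF]
  | cons a t ih =>
    intro ys k P
    simp only [List.cons_append, keepF, ih, List.length_cons]
    have : k + 1 + t.length = k + (t.length + 1) := by omega
    rw [this]
    split <;> simp

theorem keepF_snoc (xs : List Int) : ∀ (k j : Nat) (P : List Nat),
    k + xs.length ≤ j → keepF k (P ++ [j]) xs = keepF k P xs := by
  induction xs with
  | nil => intro k j P _; rfl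
  | cons a t ih =>
    intro k j P h
    simp only [List.length_cons] at h
    have hkj : ¬ k = j := by omega
    simp [keepF, hkj, ih (k+1) j P (by omega)]

theorem zip_getElem? (arr : List Int) : ∀ (m : Nat), m + 1 < arr.length →
    (arr.zip (arr.drop 1))[m]? = some (arr.getD m 0, arr.getD (m+1) 0) := by
  induction arr with
  | nil => intro m h; simp at h
  | cons a t ih =>
    intro m h
    cases t with
    | nil => simp at h
    | cons b t' =>
      cases m with
      | zero => simp [List.zip]
      | succ m' =>
        have h' : m' + 1 < (b :: t').length := by
          simp only [List.length_cons] at h ⊢; omega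
        have := ih m' h'
        simpa [List.zip] using this

-- The joint loop invariant: after m steps, A's up equals B's up, A's recorded pop
-- indices are strictly increasing and < m, and B's out is exactly the first m
-- elements with the pop positions removed.
theorem loop_inv (arr : List Int) : ∀ (m : Nat), m ≤ arr.length - 1 →
    (((List.range m).foldl (pvStepA arr) (0, 0, [])).2.1 =
       (((arr.zip (arr.drop 1)).take m).foldl pvStepB (0, [])).1) ∧
    (((List.range m).foldl (pvStepA arr) (0, 0, [])).2.2.Pairwise (· < ·)) ∧
    (∀ p ∈ ((List.range m).foldl (pvStepA arr) (0, 0, [])).2.2, p < m) ∧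
    ((((arr.zip (arr.drop 1)).take m).foldl pvStepB (0, [])).2 =
       keepF 0 ((List.range m).foldl (pvStepA arr) (0, 0, [])).2.2 (arr.take m)) := by
  intro m
  induction m with
  | zero => intro _; refine ⟨rfl, by simp, by simp, rfl⟩
  | succ m ih =>
    intro hm1
    have hm : m + 1 < arr.length := by omega
    obtain ⟨hup, hpw, hbd, hout⟩ := ih (by omega)
    have hzip : (arr.zip (arr.drop 1)).take (m+1) =
        (arr.zip (arr.drop 1)).take m ++ [(arr.getD m 0, arr.getD (m+1) 0)] := by
      rw [List.take_add_one, zip_getElem? arr m hm]; rfl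
    have htake : arr.take (m+1) = arr.take m ++ [arr.getD m 0] := by
      rw [List.take_add_one]
      congr 1
      rw [List.getD_eq_getElem?_getD, List.getElem?_eq_getElem (by omega)]
      rfl
    rw [List.range_succ, List.foldl_append, hzip, List.foldl_append, htake]
    rcases hA : (List.range m).foldl (pvStepA arr) (0, 0, ([] : List Nat)) with ⟨tA, upA, P⟩
    rcases hB : ((arr.zip (arr.drop 1)).take m).foldl pvStepB (0, ([] : List Int)) with ⟨upB, out⟩
    rw [hA] at hup hpw hbd hout
    rw [hB] at hup hout
    simp only at hup hpw hbd hout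
    subst hup
    generalize hga : arr.getD m 0 = a at *
    generalize hgb : arr.getD (m+1) 0 = b at *
    simp only [List.foldl_cons, List.foldl_nil]
    have hmnP : m ∉ P := fun h => by have := hbd m h; omega
    have hPm : (P ++ [m]).Pairwise (· < ·) :=
      List.pairwise_append.2 ⟨hpw, by simp,
        by intro x hx y hy; simp at hy; subst hy; exact hbd x hx⟩
    have hbdm : ∀ p ∈ P ++ [m], p < m + 1 := by
      intro p hp; rcases List.mem_append.1 hp with h | h
      · exact lt_trans (hbd p h) (by omega)
      · simp at h; omega
    have hbd1 : ∀ p ∈ P, p < m + 1 := fun p hp => lt_trans (hbd p hp) (by omega)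
    have hlen : (arr.take m).length = m := by
      rw [List.length_take]; omega
    have hkeep_pop : keepF 0 (P ++ [m]) (arr.take m ++ [a]) = keepF 0 P (arr.take m) := by
      rw [keepF_append, keepF_snoc (arr.take m) 0 m P (by omega)]
      simp [keepF, hlen]
    have hkeep_keep : keepF 0 P (arr.take m ++ [a]) = keepF 0 P (arr.take m) ++ [a] := by
      rw [keepF_append]
      simp [keepF, hlen, hmnP]
    by_cases h0 : b - a = 0
    · have hab : ¬ a < b := by omega
      have hba : ¬ b < a := by omega
      have eA : pvStepA arr (tA, upA, P) m = (tA, upA, P ++ [m]) := by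
        simp only [pvStepA]
        rw [hga, hgb]
        simp [h0]
      have eB : pvStepB (upA, out) (a, b) = (upA, out) := by
        simp [pvStepB, hab, hba]
      rw [eA, eB]
      exact ⟨rfl, hPm, hbdm, by rw [hout, hkeep_pop]⟩
    · by_cases hpos : b - a > 0
      · have hab : a < b := by omega
        have hba : ¬ b < a := by omega
        have hs : (if a < b then (1:Int) else 0) - (if b < a then 1 else 0) = 1 := by
          simp [hab, hba]
        by_cases hu : upA = 1
        · have eA : pvStepA arr (tA, upA, P) m = (tA, 1, P ++ [m]) := by
            simp only [pvStepA]
            rw [hga, hgb]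
            simp [h0, hab, hu]
          have eB : pvStepB (upA, out) (a, b) = (1, out) := by
            simp only [pvStepB, hs, hu]
            norm_num
          rw [eA, eB]
          exact ⟨rfl, hPm, hbdm, by rw [hout, hkeep_pop]⟩
        · have eA : pvStepA arr (tA, upA, P) m = (tA + 1, 1, P) := by
            simp only [pvStepA]
            rw [hga, hgb]
            simp [h0, hab, hu]
          have hu' : (1:Int) ≠ upA := fun h => hu h.symm
          have eB : pvStepB (upA, out) (a, b) = (1, out ++ [a]) := by
            simp only [pvStepB, hs]
            norm_num [hu']
          rw [eA, eB]
          exact ⟨rfl, hpw, hbd1, by rw [hout, hkeep_keep]⟩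
      · have hneg : b - a < 0 := by omega
        have hab : ¬ a < b := by omega
        have hba : b < a := by omega
        have hs : (if a < b then (1:Int) else 0) - (if b < a then 1 else 0) = -1 := by
          simp [hab, hba]
        by_cases hu : upA = -1
        · have eA : pvStepA arr (tA, upA, P) m = (tA, -1, P ++ [m]) := by
            simp only [pvStepA]
            rw [hga, hgb]
            simp [h0, hab, hu]
          have eB : pvStepB (upA, out) (a, b) = (-1, out) := by
            simp only [pvStepB, hs, hu]
            norm_num
          rw [eA, eB]
          exact ⟨rfl, hPm, hbdm, by rw [hout, hkeep_pop]⟩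
        · have eA : pvStepA arr (tA, upA, P) m = (tA, -1, P) := by
            simp only [pvStepA]
            rw [hga, hgb]
            simp [h0, hab, hu]
          have hu' : (-1:Int) ≠ upA := fun h => hu h.symm
          have eB : pvStepB (upA, out) (a, b) = (-1, out ++ [a]) := by
            simp only [pvStepB, hs]
            norm_num [hu']
          rw [eA, eB]
          exact ⟨rfl, hpw, hbd1, by rw [hout, hkeep_keep]⟩

-- ===== VERDICT (by name: the statement is the Claim_ definition above) =====
theorem list_reduce_directionality_spec : Claim_equal_list_reduce_directionality := by
  intro arr _
  unfold Spec_list_reduce_directionality list_reduce_directionality list_reduce_directionality_alt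
  have hzlen : (arr.zip (arr.drop 1)).length = arr.length - 1 := by
    simp [List.length_zip]
  obtain ⟨hup, hpw, hbd, hout⟩ := loop_inv arr (arr.length - 1) (le_refl _)
  set P := ((List.range (arr.length - 1)).foldl (pvStepA arr) (0, 0, [])).2.2 with hP
  have htakeall : (arr.zip (arr.drop 1)).take (arr.length - 1) = arr.zip (arr.drop 1) := by
    rw [List.take_of_length_le (by omega)]
  rw [htakeall] at hout
  simp only []
  rw [eraseIdxs_keepF P arr hpw]
  conv_lhs => rw [← List.take_append_drop (arr.length - 1) arr]
  rw [keepF_append, ← hout, PySem.List.slice_from_neg_one]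
  congr 1
  apply keepF_all
  intro m hm
  have := hbd m hm
  simp only [List.length_take]
  omega
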